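-- pv_equiv track=rewrite | github.com/Keerthan-IWMI/RAG-CBE-STREAMLIT | rag_pipeline.py | _merge_blocks
-- ===== SOURCE A (Python) =====
-- from typing import List, Dict, Tuple
-- from typing import List, Tuple, Optional, Dict
--
-- def _merge_blocks(content_blocks: List[Dict]) -> List[Dict]:
--     """Merge small adjacent blocks on same page"""
--     if not content_blocks:
--         return []
--
--     merged = []
--     current_block = None
--
--     for block in content_blocks:
--         # Always keep tables separate
--         if block["type"] == "table":
--             if current_block:
--                 merged.append(current_block)
--                 current_block = None
--             merged.append(block)
--             continue
--
--         if current_block is None: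
--             current_block = block.copy()
--             continue
--
--         # Merge if same page and combined text not too long
--         if (block["page"] == current_block["page"] and
--             len(current_block["text"]) + len(block["text"]) < 800):
--             current_block["text"] += " " + block["text"]
--         else:
--             merged.append(current_block)
--             current_block = block.copy()
--
--     if current_block:
--         merged.append(current_block)
--
--     return merged
-- ===== SOURCE B (Python) =====
-- from typing import List, Dict
--
--
-- def _merge_blocks(content_blocks: List[Dict]) -> List[Dict]:
--     """Peel one whole group off the front per outer step: a table goes through
--     as-is; otherwise an inner loop absorbs all following small same-page
--     non-table blocks into a copy of the group's first block. No pending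
--     accumulator survives an outer step and there is no post-loop flush."""
--     merged = []
--     i = 0
--     n = len(content_blocks)
--     while i < n:
--         head = content_blocks[i]
--         i += 1
--         if head["type"] == "table":
--             merged.append(head)
--             continue
--         cur = head.copy()
--         while (i < n and content_blocks[i]["type"] != "table"
--                and content_blocks[i]["page"] == cur["page"]
--                and len(cur["text"]) + len(content_blocks[i]["text"]) < 800):
--             cur["text"] += " " + content_blocks[i]["text"]
--             i += 1
--         merged.append(cur)
--     return merged
-- ===== Notes on version B (the rewrite author's own statement) =====
-- stated objective: alternative
-- what changed: Replaces A's streamed single pass with a pending current_block and a trailing flush by a group-peeling nested loop: each outer step consumes one complete group (a table, or a run of small same-page blocks absorbed by an inner loop into a copy of the group's first block) and appends it finished, so no accumulator crosses outer iterations and no flush exists.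
import Mathlib
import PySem

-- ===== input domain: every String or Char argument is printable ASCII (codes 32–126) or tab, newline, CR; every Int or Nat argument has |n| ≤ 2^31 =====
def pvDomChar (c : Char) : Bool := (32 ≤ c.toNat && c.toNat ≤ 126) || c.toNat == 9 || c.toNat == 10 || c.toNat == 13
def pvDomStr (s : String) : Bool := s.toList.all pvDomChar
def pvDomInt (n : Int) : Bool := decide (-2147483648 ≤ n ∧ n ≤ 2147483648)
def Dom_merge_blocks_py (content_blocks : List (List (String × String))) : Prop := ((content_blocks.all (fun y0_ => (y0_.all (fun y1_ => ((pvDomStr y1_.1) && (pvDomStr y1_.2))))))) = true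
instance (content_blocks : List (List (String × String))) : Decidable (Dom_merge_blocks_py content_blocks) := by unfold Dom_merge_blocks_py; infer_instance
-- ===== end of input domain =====

-- B replaces A's streamed pass with pending accumulator and trailing flush by a
-- group-peeling nested loop: each outer step emits one finished group (objective: alternative).

-- shared dict helpers: blocks are Python dicts = association lists; first-match
-- lookup with a default (inside Pre_ the key is present, so the default is unread),
-- and b[k] = v via PySem.Dict.insert (overwrite in place, exactly Python)
def pvGetKey (b : List (String × String)) (k : String) : String :=
  PySem.Dict.getD (PySem.Dict.mk b) k ""

def pvSetKey (b : List (String × String)) (k v : String) : List (String × String) :=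
  ((PySem.Dict.mk b).insert k v).items

-- ===== PORT A =====
-- one loop step of A over the state (merged, current_block); `if current_block:`
-- is Python truthiness of a dict, i.e. the None-check plus a non-emptiness check
def mergeA_step (st : List (List (String × String)) × Option (List (String × String)))
    (block : List (String × String)) :
    List (List (String × String)) × Option (List (String × String)) :=
  if pvGetKey block "type" == "table" then
    match st.2 with
    | some cb => ((if cb.isEmpty then st.1 else st.1 ++ [cb]) ++ [block], none)
    | none => (st.1 ++ [block], none)
  else
    match st.2 with
    | none => (st.1, some block)
    | some cb =>
      if pvGetKey block "page" == pvGetKey cb "page" &&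
         PySem.Str.len (pvGetKey cb "text") + PySem.Str.len (pvGetKey block "text") < 800 then
        (st.1, some (pvSetKey cb "text" (pvGetKey cb "text" ++ " " ++ pvGetKey block "text")))
      else (st.1 ++ [cb], some block)

def merge_blocks_py (content_blocks : List (List (String × String))) : List (List (String × String)) :=
  if content_blocks.isEmpty then []
  else
    let st := content_blocks.foldl mergeA_step ([], none)
    match st.2 with
    | some cb => if cb.isEmpty then st.1 else st.1 ++ [cb]
    | none => st.1

-- ===== PORT B =====
-- B's inner while loop: absorb the leading small same-page non-table blocks of
-- `blocks` into `cur`; returns the finished group head and the unconsumed suffix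
def pvAbsorb (cur : List (String × String)) (blocks : List (List (String × String))) :
    List (String × String) × List (List (String × String)) :=
  match blocks with
  | [] => (cur, [])
  | b :: t =>
    if !(pvGetKey b "type" == "table") &&
       pvGetKey b "page" == pvGetKey cur "page" &&
       PySem.Str.len (pvGetKey cur "text") + PySem.Str.len (pvGetKey b "text") < 800 then
      pvAbsorb (pvSetKey cur "text" (pvGetKey cur "text" ++ " " ++ pvGetKey b "text")) t
    else (cur, b :: t)

-- termination fact for the outer loop: the inner loop never grows the suffix
theorem pvAbsorb_snd_length (cur : List (String × String))
    (blocks : List (List (String × String))) :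
    (pvAbsorb cur blocks).2.length ≤ blocks.length := by
  induction blocks generalizing cur with
  | nil => simp [pvAbsorb]
  | cons b t ih =>
    simp only [pvAbsorb]
    split
    · exact Nat.le_succ_of_le (ih _)
    · exact Nat.le_refl _

-- B's outer while loop over the remaining suffix (the index i of Source B): peel a
-- table, or absorb a group into a copy of its first block, then continue
def merge_blocks_py_alt : List (List (String × String)) → List (List (String × String))
  | [] => []
  | head :: rest =>
    if pvGetKey head "type" == "table" then head :: merge_blocks_py_alt rest
    else (pvAbsorb head rest).1 :: merge_blocks_py_alt (pvAbsorb head rest).2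
termination_by l => l.length
decreasing_by
  · simp
  · exact Nat.lt_succ_of_le (pvAbsorb_snd_length head rest)

-- ===== PRECONDITION & SPEC =====
-- Pre_ is exactly where A returns (no KeyError): every block has a "type" key, and
-- for every adjacent pair of non-table blocks both have "page" (read to decide the
-- merge) and, when their pages are equal, both have "text" (read by the length test);
-- it also excludes association lists with duplicate keys, which represent no Python dict.
def pvHasKey (b : List (String × String)) (k : String) : Prop :=
  ((PySem.Dict.mk b).get? k).isSome

def Pre_merge_blocks_py (content_blocks : List (List (String × String))) : Prop :=
  (∀ b ∈ content_blocks, (b.map Prod.fst).Nodup ∧ pvHasKey b "type") ∧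
  ∀ p ∈ content_blocks.zip content_blocks.tail,
    (pvGetKey p.1 "type" == "table") = false → (pvGetKey p.2 "type" == "table") = false →
      pvHasKey p.1 "page" ∧ pvHasKey p.2 "page" ∧
      (pvGetKey p.1 "page" = pvGetKey p.2 "page" → pvHasKey p.1 "text" ∧ pvHasKey p.2 "text")

instance (content_blocks : List (List (String × String))) : Decidable (Pre_merge_blocks_py content_blocks) := by
  unfold Pre_merge_blocks_py pvHasKey; infer_instance

def pvWitness_merge_blocks_py : (List (List (String × String))) :=
  [[("type", "text"), ("page", "1"), ("text", "hello")],
   [("type", "text"), ("page", "1"), ("text", "world")],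
   [("type", "table"), ("text", "t")],
   [("type", "text"), ("page", "2"), ("text", "bye")]]

def Spec_merge_blocks_py (content_blocks : List (List (String × String))) (out : List (List (String × String))) : Prop := out = merge_blocks_py_alt content_blocks
instance (content_blocks : List (List (String × String))) (out : List (List (String × String))) : Decidable (Spec_merge_blocks_py content_blocks out) := by unfold Spec_merge_blocks_py; infer_instance

-- ===== CLAIM (what is proved, stated in full; the proofs are below) =====
def Claim_equal_merge_blocks_py : Prop := ∀ (content_blocks : List (List (String × String))), Dom_merge_blocks_py content_blocks → Pre_merge_blocks_py content_blocks → Spec_merge_blocks_py content_blocks (merge_blocks_py content_blocks)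

-- ===== LEMMAS AND PROOFS =====

-- a block with a "type" key is a non-empty list
theorem ne_nil_of_type_isSome (b : List (String × String))
    (h : ((PySem.Dict.mk b).get? "type").isSome) : b ≠ [] := by
  intro hnil; subst hnil; simp [PySem.Dict.get?] at h

-- overwriting a key never produces the empty list
theorem pvSetKey_ne_nil (b : List (String × String)) (k v : String) : pvSetKey b k v ≠ [] := by
  simp only [pvSetKey]
  rw [PySem.Dict.items_insert]
  split
  · next h =>
    intro hnil
    rw [List.map_eq_nil_iff] at hnil
    cases b with
    | nil => simp [PySem.Dict.contains] at h
    | cons p rest => exact List.cons_ne_nil _ _ hnil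
  · simp

-- A's trailing flush, as a function of the loop's final state
def mergeA_finish (st : List (List (String × String)) × Option (List (String × String))) :
    List (List (String × String)) :=
  match st.2 with
  | some cb => if cb.isEmpty then st.1 else st.1 ++ [cb]
  | none => st.1

-- joint characterisation of A's fold by B's group-peeling recursion:
-- from the no-pending state A produces m ++ B l, and from a pending non-empty
-- block cb it produces m ++ the absorbed group ++ B of the unconsumed suffix
theorem mergeA_fold_eq (l : List (List (String × String)))
    (hl : ∀ b ∈ l, ((PySem.Dict.mk b).get? "type").isSome) :
    (∀ m, mergeA_finish (l.foldl mergeA_step (m, none)) = m ++ merge_blocks_py_alt l) ∧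
    (∀ m cb, cb ≠ [] →
      mergeA_finish (l.foldl mergeA_step (m, some cb)) =
        m ++ (pvAbsorb cb l).1 :: merge_blocks_py_alt (pvAbsorb cb l).2) := by
  induction l with
  | nil =>
    refine ⟨fun m => by simp [mergeA_finish, merge_blocks_py_alt], ?_⟩
    intro m cb hcb
    simp [mergeA_finish, pvAbsorb, List.isEmpty_iff, hcb, merge_blocks_py_alt]
  | cons b t ih =>
    have hb := hl b List.mem_cons_self
    have ht : ∀ x ∈ t, ((PySem.Dict.mk x).get? "type").isSome :=
      fun x hx => hl x (List.mem_cons_of_mem b hx)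
    obtain ⟨ih1, ih2⟩ := ih ht
    constructor
    · intro m
      cases htype : pvGetKey b "type" == "table" with
      | true =>
        have : mergeA_step (m, none) b = (m ++ [b], none) := by simp [mergeA_step, htype]
        rw [List.foldl_cons, this, ih1]
        simp [merge_blocks_py_alt, htype]
      | false =>
        have : mergeA_step (m, none) b = (m, some b) := by simp [mergeA_step, htype]
        rw [List.foldl_cons, this, ih2 m b (ne_nil_of_type_isSome b hb)]
        simp [merge_blocks_py_alt, htype]
    · intro m cb hcb
      cases htype : pvGetKey b "type" == "table" with
      | true =>
        have : mergeA_step (m, some cb) b = (m ++ [cb] ++ [b], none) := by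
          simp [mergeA_step, htype, List.isEmpty_iff, hcb]
        rw [List.foldl_cons, this, ih1]
        have habs : pvAbsorb cb (b :: t) = (cb, b :: t) := by
          simp [pvAbsorb, htype]
        rw [habs]
        simp [merge_blocks_py_alt, htype]
      | false =>
        cases hcond : (pvGetKey b "page" == pvGetKey cb "page" &&
            decide (PySem.Str.len (pvGetKey cb "text") + PySem.Str.len (pvGetKey b "text") < 800)) with
        | true =>
          have hstep : mergeA_step (m, some cb) b =
              (m, some (pvSetKey cb "text" (pvGetKey cb "text" ++ " " ++ pvGetKey b "text"))) := by
            simp only [mergeA_step, htype, Bool.false_eq_true, if_false]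
            rw [if_pos (by simpa using hcond)]
          have habs : pvAbsorb cb (b :: t) =
              pvAbsorb (pvSetKey cb "text" (pvGetKey cb "text" ++ " " ++ pvGetKey b "text")) t := by
            simp only [pvAbsorb]
            rw [if_pos (by simp [htype]; simpa using hcond)]
          rw [List.foldl_cons, hstep, ih2 m _ (pvSetKey_ne_nil _ _ _), habs]
        | false =>
          have hstep : mergeA_step (m, some cb) b = (m ++ [cb], some b) := by
            simp only [mergeA_step, htype, Bool.false_eq_true, if_false]
            rw [if_neg (by simpa using Bool.eq_false_iff.mp hcond)]
          have habs : pvAbsorb cb (b :: t) = (cb, b :: t) := by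
            simp only [pvAbsorb]
            rw [if_neg]
            simp [htype]
            simpa using Bool.eq_false_iff.mp hcond
          rw [List.foldl_cons, hstep, ih2 (m ++ [cb]) b (ne_nil_of_type_isSome b hb), habs]
          simp [merge_blocks_py_alt, htype]

-- ===== VERDICT (by name: the statement is the Claim_ definition above) =====
theorem merge_blocks_py_spec : Claim_equal_merge_blocks_py := by
  intro blocks _ hpre
  unfold Spec_merge_blocks_py merge_blocks_py
  cases blocks with
  | nil => simp [merge_blocks_py_alt]
  | cons x xs =>
    have h := (mergeA_fold_eq (x :: xs) (fun b hb => (hpre.1 b hb).2)).1 []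
    simpa [mergeA_finish] using h
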